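-- pv_equiv track=rewrite | github.com/tesrak-stats/atr-dashboard | enhanced_summarizer.py | create_time_buckets
-- ===== SOURCE A (Python) =====
-- def create_time_buckets(base_interval_minutes, candle_interval_minutes):
--     """Create appropriate time buckets based on base and analysis timeframes"""
--
--     # Define bucketing strategy based on base interval
--     if base_interval_minutes == 240:  # 4-hour base
--         bucket_size_minutes = 30  # 30-minute buckets
--         bucket_labels = []
--         for hour in range(0, 24):
--             for minute in [0, 30]:
--                 time_str = f"{hour:02d}{minute:02d}"
--                 bucket_labels.append(time_str)
--         return bucket_labels, bucket_size_minutes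
--
--     elif base_interval_minutes == 1440:  # Daily base
--         bucket_size_minutes = 60  # Hourly buckets
--         bucket_labels = []
--         for hour in range(0, 24):
--             bucket_labels.append(f"{hour:02d}00")
--         return bucket_labels, bucket_size_minutes
--
--     elif base_interval_minutes == 10080:  # Weekly base
--         bucket_size_minutes = 240  # 4-hour buckets
--         bucket_labels = ["0000", "0400", "0800", "1200", "1600", "2000"]
--         return bucket_labels, bucket_size_minutes
--
--     elif base_interval_minutes == 43200:  # Monthly base
--         bucket_size_minutes = 1440  # Daily buckets
--         bucket_labels = ["Mon", "Tue", "Wed", "Thu", "Fri", "Sat", "Sun"]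
--         return bucket_labels, bucket_size_minutes
--
--     else:
--         # Default to hourly if unknown
--         bucket_size_minutes = 60
--         bucket_labels = []
--         for hour in range(0, 24):
--             bucket_labels.append(f"{hour:02d}00")
--         return bucket_labels, bucket_size_minutes
-- ===== SOURCE B (Python) =====
-- def create_time_buckets(base_interval_minutes, candle_interval_minutes):
--     """Create appropriate time buckets based on base and analysis timeframes"""
--     bucket_size_minutes = {240: 30, 1440: 60, 10080: 240, 43200: 1440}.get(base_interval_minutes, 60)
--     if base_interval_minutes == 43200:
--         return ["Mon", "Tue", "Wed", "Thu", "Fri", "Sat", "Sun"], bucket_size_minutes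
--     labels = [f"{m // 60:02d}{m % 60:02d}" for m in range(0, 1440, bucket_size_minutes)]
--     return labels, bucket_size_minutes
-- ===== Notes on version B (the rewrite author's own statement) =====
-- stated objective: simpler
-- what changed: Replaces the five hardcoded per-branch label loops/lists with one size lookup table plus a single parametric minute-of-day loop (range(0,1440,bucket_size)), keeping only the monthly weekday list special-cased.
import Mathlib
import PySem

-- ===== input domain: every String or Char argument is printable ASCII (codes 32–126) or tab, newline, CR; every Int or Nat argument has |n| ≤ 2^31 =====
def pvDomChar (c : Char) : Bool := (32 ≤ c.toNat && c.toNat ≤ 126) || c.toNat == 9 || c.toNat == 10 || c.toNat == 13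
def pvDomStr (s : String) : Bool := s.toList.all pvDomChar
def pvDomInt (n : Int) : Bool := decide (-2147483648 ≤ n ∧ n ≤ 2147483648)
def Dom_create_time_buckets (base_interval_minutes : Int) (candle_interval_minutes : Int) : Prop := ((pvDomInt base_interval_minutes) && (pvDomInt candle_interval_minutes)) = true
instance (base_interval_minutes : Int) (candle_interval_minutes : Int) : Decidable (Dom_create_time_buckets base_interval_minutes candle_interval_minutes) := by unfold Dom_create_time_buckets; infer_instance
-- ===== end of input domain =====

-- B replaces A's five hardcoded per-branch label loops with one bucket-size lookup plus a single
-- parametric minute-of-day loop (the monthly weekday list stays special-cased): simpler decomposition.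


-- f"{n:02d}" for 0 ≤ n < 100 (the only values reached: hours 0..23 and minutes 0/30)
def pvPad2 (n : Int) : String := if n < 10 then "0" ++ PySem.Int.toStr n else PySem.Int.toStr n

-- ===== PORT A =====
def create_time_buckets (base_interval_minutes : Int) (candle_interval_minutes : Int) : List String × Int :=
  if base_interval_minutes == 240 then
    let bucket_size_minutes : Int := 30
    let bucket_labels : List String :=
      (PySem.List.pyRange 0 24 1).foldl (fun acc hour =>
        ([(0 : Int), 30]).foldl (fun acc minute => acc ++ [pvPad2 hour ++ pvPad2 minute]) acc) []
    (bucket_labels, bucket_size_minutes)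
  else if base_interval_minutes == 1440 then
    let bucket_size_minutes : Int := 60
    let bucket_labels : List String :=
      (PySem.List.pyRange 0 24 1).foldl (fun acc hour => acc ++ [pvPad2 hour ++ "00"]) []
    (bucket_labels, bucket_size_minutes)
  else if base_interval_minutes == 10080 then
    (["0000", "0400", "0800", "1200", "1600", "2000"], 240)
  else if base_interval_minutes == 43200 then
    (["Mon", "Tue", "Wed", "Thu", "Fri", "Sat", "Sun"], 1440)
  else
    let bucket_size_minutes : Int := 60
    let bucket_labels : List String :=
      (PySem.List.pyRange 0 24 1).foldl (fun acc hour => acc ++ [pvPad2 hour ++ "00"]) []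
    (bucket_labels, bucket_size_minutes)

-- ===== PORT B =====
def create_time_buckets_alt (base_interval_minutes : Int) (candle_interval_minutes : Int) : List String × Int :=
  let bucket_size_minutes : Int :=
    (PySem.Dict.ofList [((240 : Int), (30 : Int)), (1440, 60), (10080, 240), (43200, 1440)]).getD base_interval_minutes 60
  if base_interval_minutes == 43200 then
    (["Mon", "Tue", "Wed", "Thu", "Fri", "Sat", "Sun"], bucket_size_minutes)
  else
    let labels : List String :=
      (PySem.List.pyRange 0 1440 bucket_size_minutes).map (fun m =>
        pvPad2 (PySem.Int.floordiv m 60) ++ pvPad2 (PySem.Int.mod m 60))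
    (labels, bucket_size_minutes)

-- ===== PRECONDITION & SPEC =====
def Spec_create_time_buckets (base_interval_minutes : Int) (candle_interval_minutes : Int) (out : List String × Int) : Prop := out = create_time_buckets_alt base_interval_minutes candle_interval_minutes
instance (base_interval_minutes : Int) (candle_interval_minutes : Int) (out : List String × Int) : Decidable (Spec_create_time_buckets base_interval_minutes candle_interval_minutes out) := by unfold Spec_create_time_buckets; infer_instance

-- ===== CLAIM (what is proved, stated in full; the proofs are below) =====
def Claim_equal_create_time_buckets : Prop := ∀ (base_interval_minutes : Int) (candle_interval_minutes : Int), Dom_create_time_buckets base_interval_minutes candle_interval_minutes → Spec_create_time_buckets base_interval_minutes candle_interval_minutes (create_time_buckets base_interval_minutes candle_interval_minutes)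

-- ===== LEMMAS AND PROOFS =====

-- ===== VERDICT (by name: the statement is the Claim_ definition above) =====
theorem create_time_buckets_spec : Claim_equal_create_time_buckets := by
  intro b c _
  unfold Spec_create_time_buckets create_time_buckets create_time_buckets_alt
  by_cases h1 : b = 240
  · subst h1; decide
  · by_cases h2 : b = 1440
    · subst h2; decide
    · by_cases h3 : b = 10080
      · subst h3; decide
      · by_cases h4 : b = 43200
        · subst h4; decide
        · simp only [beq_iff_eq, if_neg h1, if_neg h2, if_neg h3, if_neg h4]
          have e1 : (((240:Int)) == b) = false := by simp [Ne.symm h1]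
          have e2 : (((1440:Int)) == b) = false := by simp [Ne.symm h2]
          have e3 : (((10080:Int)) == b) = false := by simp [Ne.symm h3]
          have e4 : (((43200:Int)) == b) = false := by simp [Ne.symm h4]
          have : (PySem.Dict.ofList [((240 : Int), (30 : Int)), (1440, 60), (10080, 240), (43200, 1440)]).getD b 60 = 60 := by
            simp [PySem.Dict.ofList, PySem.Dict.getD, PySem.Dict.get?, PySem.Dict.empty,
                  PySem.Dict.update, PySem.Dict.insert, PySem.Dict.items, PySem.Dict.contains,
                  List.find?, e1, e2, e3, e4]
          rw [this]
          decide
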